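-- pv_equiv track=rewrite | github.com/eshun4/Data-Structures-and-Algorithms-in-Python-2024 | Sliding Window/sawtooth.py | sum_of_sawtooth_subarrays
-- ===== SOURCE A (Python) =====
-- def sum_of_sawtooth_subarrays(array):
--     # early exit
--     if len(array) == 1:
--         return 1
--     # create a left pointer
--     left = 0
--     # create a windows sum variable
--     win_sum = 0
--     # iterate through the length of array
--     for right in range(len(array)):
--         # compare current value to previous
--         if right > 0 and (array[right - 1] % 2) != (array[right] % 2):
--             win_sum += right - left + 1
--         else:
--             left = right
--             win_sum += 1
--
--     return win_sum
-- ===== SOURCE B (Python) =====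
-- def sum_of_sawtooth_subarrays(array):
--     if not array:
--         return 0
--     total = 0
--     run = 1
--     for i in range(1, len(array)):
--         if array[i - 1] % 2 != array[i] % 2:
--             run += 1
--         else:
--             total += run * (run + 1) // 2
--             run = 1
--     return total + run * (run + 1) // 2
-- ===== Notes on version B (the rewrite author's own statement) =====
-- stated objective: alternative
-- what changed: B replaces A's left-pointer sliding window (adding the current window length at every index) by detecting maximal alternating-parity runs and adding the triangular number L*(L+1)//2 once per run.
import Mathlib
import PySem

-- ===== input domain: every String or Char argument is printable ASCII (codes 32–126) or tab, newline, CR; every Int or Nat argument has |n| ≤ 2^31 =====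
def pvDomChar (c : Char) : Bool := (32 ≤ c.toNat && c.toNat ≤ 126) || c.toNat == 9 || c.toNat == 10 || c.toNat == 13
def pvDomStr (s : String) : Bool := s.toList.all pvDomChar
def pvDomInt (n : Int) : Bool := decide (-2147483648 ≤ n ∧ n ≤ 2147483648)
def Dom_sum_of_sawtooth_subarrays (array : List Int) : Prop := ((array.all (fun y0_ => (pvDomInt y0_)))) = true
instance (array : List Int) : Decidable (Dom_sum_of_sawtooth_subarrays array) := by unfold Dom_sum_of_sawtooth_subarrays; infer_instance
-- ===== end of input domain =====

-- B counts maximal alternating-parity runs and adds L*(L+1)//2 per run instead of A's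
-- left-pointer sliding window; same O(n) cost, different decomposition ("alternative").

-- ===== PORT A =====
-- loop body of A: state (left, win_sum), index right
def sawtoothBody (array : List Int) (s : Int × Int) (right : Int) : Int × Int :=
  if right > 0 ∧
      PySem.Int.mod (PySem.List.pyGetD array (right - 1) 0) 2 ≠
      PySem.Int.mod (PySem.List.pyGetD array right 0) 2 then
    (s.1, s.2 + (right - s.1 + 1))
  else
    (right, s.2 + 1)

def sum_of_sawtooth_subarrays (array : List Int) : Int :=
  if array.length = 1 then 1
  else
    ((PySem.List.pyRange 0 (array.length : Int) 1).foldl (sawtoothBody array) (0, 0)).2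

-- ===== PORT B =====
-- B's loop: prev = previous element, rest = remaining elements, run = current run length, total = closed runs
def sawtoothGo (prev : Int) (rest : List Int) (run total : Int) : Int :=
  match rest with
  | [] => total + PySem.Int.floordiv (run * (run + 1)) 2
  | y :: ys =>
    if PySem.Int.mod prev 2 ≠ PySem.Int.mod y 2 then
      sawtoothGo y ys (run + 1) total
    else
      sawtoothGo y ys 1 (total + PySem.Int.floordiv (run * (run + 1)) 2)

def sum_of_sawtooth_subarrays_alt (array : List Int) : Int :=
  match array with
  | [] => 0
  | x :: xs => sawtoothGo x xs 1 0

-- ===== PRECONDITION & SPEC =====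
def Spec_sum_of_sawtooth_subarrays (array : List Int) (out : Int) : Prop := out = sum_of_sawtooth_subarrays_alt array
instance (array : List Int) (out : Int) : Decidable (Spec_sum_of_sawtooth_subarrays array out) := by unfold Spec_sum_of_sawtooth_subarrays; infer_instance

-- ===== CLAIM (what is proved, stated in full; the proofs are below) =====
def Claim_equal_sum_of_sawtooth_subarrays : Prop := ∀ (array : List Int), Dom_sum_of_sawtooth_subarrays array → Spec_sum_of_sawtooth_subarrays array (sum_of_sawtooth_subarrays array)

-- ===== LEMMAS AND PROOFS =====

-- sum of the window-length contributions A still adds while processing `rest`,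
-- given the previous element and the current run length r
def sawG (prev : Int) (rest : List Int) (r : Int) : Int :=
  match rest with
  | [] => 0
  | y :: ys =>
    if PySem.Int.mod prev 2 ≠ PySem.Int.mod y 2 then
      (r + 1) + sawG y ys (r + 1)
    else
      1 + sawG y ys 1

theorem tri_succ (r : Int) (_h : 0 ≤ r) :
    PySem.Int.floordiv ((r + 1) * (r + 2)) 2 = PySem.Int.floordiv (r * (r + 1)) 2 + (r + 1) := by
  simp only [PySem.Int.floordiv_eq_ediv_of_pos (show (0:Int) < 2 by norm_num)]
  have h2 : (r + 1) * (r + 2) = r * (r + 1) + (r + 1) * 2 := by ring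
  rw [h2, Int.add_mul_ediv_right _ _ (by norm_num)]

theorem sawtoothGo_eq (rest : List Int) : ∀ (prev run total : Int), 0 ≤ run →
    sawtoothGo prev rest run total =
      total + PySem.Int.floordiv (run * (run + 1)) 2 + sawG prev rest run := by
  induction rest with
  | nil => intro prev run total _; simp [sawtoothGo, sawG]
  | cons y ys ih =>
    intro prev run total hrun
    simp only [sawtoothGo, sawG]
    split_ifs with h
    · rw [ih y (run + 1) total (by omega)]
      have ht := tri_succ run hrun
      rw [show (run + 1) * (run + 1 + 1) = (run + 1) * (run + 2) from by ring]
      omega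
    · rw [ih y 1 (total + PySem.Int.floordiv (run * (run + 1)) 2) (by norm_num)]
      have h1 : PySem.Int.floordiv ((1 : Int) * (1 + 1)) 2 = 1 := by decide
      omega

theorem getD_mid (pre : List Int) (prev : Int) (rest : List Int) :
    PySem.List.pyGetD (pre ++ prev :: rest) ((pre.length : Int)) 0 = prev := by
  rw [PySem.List.pyGetD_natCast]
  simp [List.getD]

theorem getD_mid_succ (pre : List Int) (prev y : Int) (rest : List Int) :
    PySem.List.pyGetD (pre ++ prev :: y :: rest) ((pre.length : Int) + 1) 0 = y := by
  have h : ((pre.length : Int) + 1) = ((pre.length + 1 : Nat) : Int) := by push_cast; ring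
  rw [h, PySem.List.pyGetD_natCast]
  simp [List.getD]

theorem foldA_eq (rest : List Int) : ∀ (prev : Int) (pre : List Int) (win r : Int), 1 ≤ r →
    ((PySem.List.pyRange ((pre.length : Int) + 1) (((pre ++ prev :: rest).length : Int)) 1).foldl
        (sawtoothBody (pre ++ prev :: rest)) ((pre.length : Int) - (r - 1), win)).2
      = win + sawG prev rest r := by
  induction rest with
  | nil =>
    intro prev pre win r hr
    have hlen : (((pre ++ prev :: []).length : Int)) = (pre.length : Int) + 1 := by
      simp
    rw [hlen, PySem.List.pyRange_one_eq_nil (le_refl _)]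
    simp [sawG]
  | cons y ys ih =>
    intro prev pre win r hr
    have hlen : (((pre ++ prev :: y :: ys).length : Int)) = (pre.length : Int) + 2 + ys.length := by
      simp; ring
    rw [PySem.List.pyRange_one_cons (by rw [hlen]; omega), List.foldl_cons]
    have hbody : sawtoothBody (pre ++ prev :: y :: ys) ((pre.length : Int) - (r - 1), win)
        ((pre.length : Int) + 1) =
        if PySem.Int.mod prev 2 ≠ PySem.Int.mod y 2 then
          ((pre.length : Int) - (r - 1), win + (r + 1))
        else ((pre.length : Int) + 1, win + 1) := by
      have h1 : (pre.length : Int) + 1 - 1 = (pre.length : Int) := by ring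
      simp only [sawtoothBody, h1, getD_mid, getD_mid_succ]
      split_ifs with hc1 hc2 hc2
      · have : (pre.length : Int) + 1 - ((pre.length : Int) - (r - 1)) + 1 = r + 1 := by ring
        rw [this]
      · exact absurd hc1.2 hc2
      · exact absurd ⟨by positivity, hc2⟩ hc1
      · rfl
    rw [hbody]
    have harr : pre ++ prev :: y :: ys = (pre ++ [prev]) ++ y :: ys := by simp
    have hlen2 : (pre.length : Int) + 1 = (((pre ++ [prev]).length : Int)) := by simp
    split_ifs with hc
    · have := ih y (pre ++ [prev]) (win + (r + 1)) (r + 1) (by omega)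
      have hleft : ((pre ++ [prev]).length : Int) - (r + 1 - 1) = (pre.length : Int) - (r - 1) := by
        simp; ring
      rw [hleft, ← harr, ← hlen2] at this
      rw [this]
      simp only [sawG]
      rw [if_pos hc]
      ring
    · have := ih y (pre ++ [prev]) (win + 1) 1 (by omega)
      have hleft : ((pre ++ [prev]).length : Int) - (1 - 1) = (pre.length : Int) + 1 := by
        simp
      rw [hleft, ← harr, ← hlen2] at this
      rw [this]
      simp only [sawG]
      rw [if_neg hc]
      ring

theorem sum_of_sawtooth_subarrays_spec' : ∀ (array : List Int),
    sum_of_sawtooth_subarrays array = sum_of_sawtooth_subarrays_alt array := by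
  intro array
  match array with
  | [] => decide
  | x :: xs =>
    have hBdef : sum_of_sawtooth_subarrays_alt (x :: xs) = sawtoothGo x xs 1 0 := rfl
    unfold sum_of_sawtooth_subarrays
    rw [hBdef, sawtoothGo_eq xs x 1 0 (by norm_num)]
    have hB : (0 : Int) + PySem.Int.floordiv (1 * (1 + 1)) 2 + sawG x xs 1 = 1 + sawG x xs 1 := by
      norm_num
    rw [hB]
    by_cases hone : (x :: xs).length = 1
    · have hxs : xs = [] := by
        cases xs with
        | nil => rfl
        | cons a as => simp at hone
      subst hxs
      simp [sawG]
    · rw [if_neg hone]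
      have hlen : (((x :: xs).length : Int)) = 0 + 1 + xs.length := by simp; ring
      rw [hlen, PySem.List.pyRange_one_cons (by positivity), List.foldl_cons]
      have hbody0 : sawtoothBody (x :: xs) (0, 0) 0 = (0, 1) := by
        simp [sawtoothBody]
      rw [hbody0]
      have := foldA_eq xs x [] 1 1 (le_refl 1)
      simp only [List.length_nil, Nat.cast_zero, List.nil_append] at this
      have hleft : (0 : Int) - (1 - 1) = 0 := by ring
      rw [hleft] at this
      have hlen2 : (0 : Int) + 1 + xs.length = ((x :: xs).length : Int) := by simp; ring
      rw [hlen2, this]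

-- ===== VERDICT (by name: the statement is the Claim_ definition above) =====
theorem sum_of_sawtooth_subarrays_spec : Claim_equal_sum_of_sawtooth_subarrays := by
  intro array _
  unfold Spec_sum_of_sawtooth_subarrays
  exact sum_of_sawtooth_subarrays_spec' array
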